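-- pv_equiv track=rewrite | github.com/1310097824-sys/Mahjong | app/engine.py | hand_has_isshoku_sanjun
-- ===== SOURCE A (Python) =====
-- def hand_has_isshoku_sanjun(hand: list[list[int]]) -> bool:
--     sequence_counts: dict[tuple[int, int, int], int] = {}
--     for group in hand:
--         if len(group) != 3:
--             continue
--         if group[0] >= 27:
--             continue
--         if group[0] + 1 == group[1] and group[1] + 1 == group[2]:
--             key = (group[0], group[1], group[2])
--             sequence_counts[key] = sequence_counts.get(key, 0) + 1
--             if sequence_counts[key] >= 3:
--                 return True
--     return False
-- ===== SOURCE B (Python) =====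
-- def hand_has_isshoku_sanjun(hand: list[list[int]]) -> bool:
--     bases = sorted(g[0] for g in hand
--                    if len(g) == 3 and g[0] < 27 and g[0] + 1 == g[1] and g[1] + 1 == g[2])
--     # in a sorted list, a value occurring 3+ times shows up as bases[0] == bases[2] in some suffix
--     while len(bases) >= 3:
--         if bases[0] == bases[2]:
--             return True
--         bases = bases[1:]
--     return False
-- ===== Notes on version B (the rewrite author's own statement) =====
-- stated objective: alternative
-- what changed: Replaces A's hash-map counting with early return by sort-then-scan: B collects the base tile of each valid sequence group, sorts the bases, and scans the sorted list for a window xs[0]==xs[2], which in a sorted list is exactly a value occurring three times.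
import Mathlib
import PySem

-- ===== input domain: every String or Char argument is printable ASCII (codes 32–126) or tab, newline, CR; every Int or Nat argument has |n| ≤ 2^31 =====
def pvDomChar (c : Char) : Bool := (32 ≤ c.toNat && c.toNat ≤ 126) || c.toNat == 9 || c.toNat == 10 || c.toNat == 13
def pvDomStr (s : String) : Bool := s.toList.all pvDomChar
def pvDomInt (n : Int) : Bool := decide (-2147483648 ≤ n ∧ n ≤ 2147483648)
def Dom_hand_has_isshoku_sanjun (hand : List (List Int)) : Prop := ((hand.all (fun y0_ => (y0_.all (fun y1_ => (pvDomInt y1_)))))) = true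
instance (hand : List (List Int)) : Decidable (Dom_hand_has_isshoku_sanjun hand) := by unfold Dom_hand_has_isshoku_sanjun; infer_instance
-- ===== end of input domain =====

-- B replaces A's dict-counting loop by sort-then-scan: sort the valid sequence bases and look for xs[0]==xs[2] in some suffix (alternative algorithm, not claimed faster).


-- ===== PORT A =====
-- literal port of A's loop: dict of counts, continue-guards, early return at count ≥ 3
def pvALoop : List (List Int) → PySem.Dict (Int × Int × Int) Int → Bool
  | [], _ => false
  | g :: rest, d =>
    match g with
    | [a, b, c] =>
      if a ≥ 27 then pvALoop rest d
      else if a + 1 = b ∧ b + 1 = c then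
        let cnt := d.getD (a, b, c) 0 + 1
        if cnt ≥ 3 then true else pvALoop rest (d.insert (a, b, c) cnt)
      else pvALoop rest d
    | _ => pvALoop rest d   -- len(group) != 3: continue

def hand_has_isshoku_sanjun (hand : List (List Int)) : Bool :=
  pvALoop hand PySem.Dict.empty

-- ===== PORT B =====
-- bases = sorted(g[0] for g in hand if len(g)==3 and g[0]<27 and g[0]+1==g[1] and g[1]+1==g[2])
def pvBases (hand : List (List Int)) : List Int :=
  hand.filterMap (fun g =>
    match g with
    | [a, b, c] => if a < 27 ∧ a + 1 = b ∧ b + 1 = c then some a else none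
    | _ => none)

-- while len(bases) >= 3: if bases[0] == bases[2]: return True; bases = bases[1:]   (bases[1:] = drop-head, exact for this nonneg slice)
def pvScan : List Int → Bool
  | a :: b :: c :: t => if a = c then true else pvScan (b :: c :: t)
  | _ => false
termination_by l => l.length
decreasing_by simp

def hand_has_isshoku_sanjun_alt (hand : List (List Int)) : Bool :=
  pvScan (PySem.List.sorted (pvBases hand) (fun x => x) false)

-- ===== PRECONDITION & SPEC =====
def Spec_hand_has_isshoku_sanjun (hand : List (List Int)) (out : Bool) : Prop := out = hand_has_isshoku_sanjun_alt hand
instance (hand : List (List Int)) (out : Bool) : Decidable (Spec_hand_has_isshoku_sanjun hand out) := by unfold Spec_hand_has_isshoku_sanjun; infer_instance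

-- ===== CLAIM (what is proved, stated in full; the proofs are below) =====
def Claim_equal_hand_has_isshoku_sanjun : Prop := ∀ (hand : List (List Int)), Dom_hand_has_isshoku_sanjun hand → Spec_hand_has_isshoku_sanjun hand (hand_has_isshoku_sanjun hand)

-- ===== LEMMAS AND PROOFS =====

-- proof-side view of A: the multiset of valid sequence keys
def pvBKeys (hand : List (List Int)) : List (Int × Int × Int) :=
  hand.filterMap (fun g =>
    match g with
    | [a, b, c] => if a < 27 ∧ a + 1 = b ∧ b + 1 = c then some (a, b, c) else none
    | _ => none)

-- loop invariant: with every stored count ≤ 2, A's loop says true iff some key of the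
-- remaining suffix reaches 3 when its stored prefix count is added to its suffix count
theorem pvALoop_iff (rest : List (List Int)) : ∀ (d : PySem.Dict (Int × Int × Int) Int),
    (∀ k, d.getD k 0 ≤ 2) →
    (pvALoop rest d = true ↔
      ∃ k ∈ pvBKeys rest, 3 ≤ d.getD k 0 + ((pvBKeys rest).count k : Int)) := by
  induction rest with
  | nil => intro d _; simp [pvALoop, pvBKeys]
  | cons g rest ih =>
    intro d hd
    rcases g with _ | ⟨a, _ | ⟨b, _ | ⟨c, _ | ⟨x, t⟩⟩⟩⟩
    · simpa [pvALoop, pvBKeys] using ih d hd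
    · simpa [pvALoop, pvBKeys] using ih d hd
    · simpa [pvALoop, pvBKeys] using ih d hd
    · by_cases h27 : a ≥ 27
      · have : ¬ (a < 27 ∧ a + 1 = b ∧ b + 1 = c) := by omega
        simpa [pvALoop, pvBKeys, h27, this] using ih d hd
      · by_cases hseq : a + 1 = b ∧ b + 1 = c
        · have hkey : a < 27 ∧ a + 1 = b ∧ b + 1 = c := ⟨by omega, hseq⟩
          have hkeys : pvBKeys ([a, b, c] :: rest) = (a, b, c) :: pvBKeys rest := by
            simp [pvBKeys, hkey]
          by_cases hcnt : d.getD (a, b, c) 0 + 1 ≥ 3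
          · have hl : pvALoop ([a, b, c] :: rest) d = true := by
              simp [pvALoop, h27, hseq, hcnt]
            rw [hl, hkeys]
            simp only [true_iff]
            exact ⟨(a, b, c), by simp, by
              rw [List.count_cons_self]; push_cast; omega⟩
          · have hl : pvALoop ([a, b, c] :: rest) d
                = pvALoop rest (d.insert (a, b, c) (d.getD (a, b, c) 0 + 1)) := by
              simp [pvALoop, h27, hseq, hcnt]
            have hd' : ∀ k, (d.insert (a, b, c) (d.getD (a, b, c) 0 + 1)).getD k 0 ≤ 2 := by
              intro k
              rw [PySem.Dict.getD_insert]
              split_ifs with he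
              · omega
              · exact hd k
            rw [hl, ih _ hd', hkeys]
            constructor
            · rintro ⟨k, hk, hge⟩
              rw [PySem.Dict.getD_insert] at hge
              by_cases he : k = (a, b, c)
              · subst he
                exact ⟨(a, b, c), by simp, by rw [List.count_cons_self]; push_cast; omega⟩
              · refine ⟨k, by simp [hk], ?_⟩
                rw [if_neg he] at hge
                rwa [List.count_cons_of_ne (Ne.symm he)]
            · rintro ⟨k, hk, hge⟩
              by_cases he : k = (a, b, c)
              · subst he
                rw [List.count_cons_self] at hge
                have hpos : 0 < (pvBKeys rest).count (a, b, c) := by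
                  by_contra hz
                  push_cast at hge
                  omega
                refine ⟨(a, b, c), List.count_pos_iff.mp hpos, ?_⟩
                rw [PySem.Dict.getD_insert, if_pos rfl]
                push_cast at hge ⊢
                omega
              · have hk' : k ∈ pvBKeys rest := by
                  rcases List.mem_cons.mp hk with h | h
                  · exact absurd h he
                  · exact h
                refine ⟨k, hk', ?_⟩
                rw [PySem.Dict.getD_insert, if_neg he]
                rwa [List.count_cons_of_ne (Ne.symm he)] at hge
        · have : ¬ (a < 27 ∧ a + 1 = b ∧ b + 1 = c) := by tauto
          simpa [pvALoop, pvBKeys, h27, hseq, this] using ih d hd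
    · simpa [pvALoop, pvBKeys] using ih d hd

-- the bases are the first components of the keys
theorem pvBases_eq_map (hand : List (List Int)) :
    pvBases hand = (pvBKeys hand).map (fun k => k.1) := by
  induction hand with
  | nil => simp [pvBases, pvBKeys]
  | cons g rest ih =>
    rcases g with _ | ⟨a, _ | ⟨b, _ | ⟨c, _ | ⟨x, t⟩⟩⟩⟩
    · simpa [pvBases, pvBKeys] using ih
    · simpa [pvBases, pvBKeys] using ih
    · simpa [pvBases, pvBKeys] using ih
    · by_cases hc : a < 27 ∧ a + 1 = b ∧ b + 1 = c
      · simp [pvBases, pvBKeys, hc] at ih ⊢; exact ih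
      · simp [pvBases, pvBKeys, hc] at ih ⊢; exact ih
    · simpa [pvBases, pvBKeys] using ih

-- every key has the shape (a, a+1, a+2)
theorem pvBKeys_shape (hand : List (List Int)) :
    ∀ k ∈ pvBKeys hand, k.2.1 = k.1 + 1 ∧ k.2.2 = k.1 + 2 := by
  intro k hk
  obtain ⟨g, _, he⟩ := List.mem_filterMap.mp hk
  rcases g with _ | ⟨a, _ | ⟨b, _ | ⟨c, _ | ⟨x, t⟩⟩⟩⟩ <;> simp at he
  obtain ⟨⟨_, h1, h2⟩, rfl⟩ := he
  exact ⟨by simpa using h1.symm, by simp; omega⟩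

-- counting a shaped key in a shaped list = counting its base among the first components
theorem count_shaped (L : List (Int × Int × Int))
    (hL : ∀ k ∈ L, k.2.1 = k.1 + 1 ∧ k.2.2 = k.1 + 2) (a : Int) :
    L.count (a, a + 1, a + 2) = (L.map (fun k => k.1)).count a := by
  induction L with
  | nil => simp
  | cons h tl ih =>
    obtain ⟨h1, h2⟩ := hL h (by simp)
    have ih' := ih (fun k hk => hL k (by simp [hk]))
    obtain ⟨x, y, z⟩ := h
    simp only at h1 h2
    subst h1 h2
    by_cases he : x = a
    · subst he; simp [ih']
    · have hne : (x, x + 1, x + 2) ≠ (a, a + 1, a + 2) := by simp [he]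
      simp [hne, he, ih']

-- on a sorted list, the scan finds True exactly when some value occurs ≥ 3 times
theorem pvScan_iff : ∀ (l : List Int), l.Pairwise (· ≤ ·) →
    (pvScan l = true ↔ ∃ x, 3 ≤ l.count x)
  | [] => by
      intro _
      constructor
      · intro h; simp [pvScan] at h
      · rintro ⟨x, hx⟩; simp at hx
  | [a] => by
      intro _
      constructor
      · intro h; simp [pvScan] at h
      · rintro ⟨x, hx⟩
        have hle := List.count_le_length (a := x) (l := [a])
        simp at hle; omega
  | [a, b] => by
      intro _
      constructor
      · intro h; simp [pvScan] at h
      · rintro ⟨x, hx⟩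
        have hle := List.count_le_length (a := x) (l := [a, b])
        simp at hle; omega
  | a :: b :: c :: t => by
      intro h
      obtain ⟨ha, htail⟩ := List.pairwise_cons.mp h
      obtain ⟨hb, htail2⟩ := List.pairwise_cons.mp htail
      obtain ⟨hct, _⟩ := List.pairwise_cons.mp htail2
      have hab : a ≤ b := ha b (by simp)
      have hac : a ≤ c := ha c (by simp)
      have hbc : b ≤ c := hb c (by simp)
      by_cases hce : a = c
      · have hba : b = a := le_antisymm (by omega) hab
        constructor
        · intro _
          refine ⟨a, ?_⟩
          rw [hba, ← hce]
          simp
        · intro _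
          simp [pvScan, hce]
      · have hstep : pvScan (a :: b :: c :: t) = pvScan (b :: c :: t) := by
          simp [pvScan, hce]
        rw [hstep, pvScan_iff (b :: c :: t) htail]
        constructor
        · rintro ⟨x, hx⟩
          refine ⟨x, ?_⟩
          rw [List.count_cons]
          omega
        · rintro ⟨x, hx⟩
          by_cases hxa : x = a
          · subst hxa
            exfalso
            rw [List.count_cons] at hx
            have h2 : 2 ≤ (b :: c :: t).count x := by
              split at hx <;> omega
            rw [List.count_cons] at h2
            have h1 : 1 ≤ (c :: t).count x := by
              split at h2 <;> omega
            have hmem : x ∈ c :: t := List.count_pos_iff.mp (by omega)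
            have hxc : x = c := by
              rcases List.mem_cons.mp hmem with h' | h'
              · exact h'
              · exact le_antisymm (hct x h') hac |>.symm
            exact hce hxc
          · refine ⟨x, ?_⟩
            have hne : (a == x) = false := by
              simp [beq_eq_false_iff_ne]
              exact fun h' => hxa h'.symm
            rw [List.count_cons] at hx
            rw [hne] at hx
            simpa using hx
termination_by l => l.length

-- ===== VERDICT (by name: the statement is the Claim_ definition above) =====
theorem hand_has_isshoku_sanjun_spec : Claim_equal_hand_has_isshoku_sanjun := by
  intro hand _
  unfold Spec_hand_has_isshoku_sanjun hand_has_isshoku_sanjun hand_has_isshoku_sanjun_alt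
  have hinv := pvALoop_iff hand PySem.Dict.empty (by intro k; simp [PySem.Dict.getD_empty])
  simp only [PySem.Dict.getD_empty, zero_add] at hinv
  have hsortp : (PySem.List.sorted (pvBases hand) (fun x => x) false).Pairwise (· ≤ ·) := by
    have := PySem.List.sorted_pairwise (pvBases hand) (fun x => x)
    simpa using this
  have hperm : (PySem.List.sorted (pvBases hand) (fun x => x) false).Perm (pvBases hand) :=
    PySem.List.sorted_perm _ _ _
  rw [Bool.eq_iff_iff, hinv, pvScan_iff _ hsortp]
  constructor
  · rintro ⟨k, hk, hge⟩
    obtain ⟨h1, h2⟩ := pvBKeys_shape hand k hk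
    obtain ⟨a, y, z⟩ := k
    simp only at h1 h2
    subst h1 h2
    refine ⟨a, ?_⟩
    rw [hperm.count_eq, pvBases_eq_map, ← count_shaped _ (pvBKeys_shape hand)]
    exact_mod_cast hge
  · rintro ⟨x, hx⟩
    rw [hperm.count_eq, pvBases_eq_map] at hx
    have hmem : x ∈ (pvBKeys hand).map (fun k => k.1) :=
      List.count_pos_iff.mp (by omega)
    obtain ⟨k, hk, hkx⟩ := List.mem_map.mp hmem
    obtain ⟨h1, h2⟩ := pvBKeys_shape hand k hk
    obtain ⟨a, y, z⟩ := k
    simp only at h1 h2 hkx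
    subst h1 h2 hkx
    refine ⟨(a, a + 1, a + 2), hk, ?_⟩
    rw [count_shaped _ (pvBKeys_shape hand)]
    exact_mod_cast hx
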